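-- pv_equiv track=rewrite | github.com/swathiravi2911/Problems_Solving | Intermediate_Problems/Arrays_Prefix_Sum/Pick_from_both_sides.py | solve
-- ===== SOURCE A (Python) =====
-- def solve(A, B):
--     N = len(A)
--
--     # creating empty arrays
--     pf_sum = [0 for i in range(N)]   # [0] * N
--     sf_sum = [0 for i in range(N)]
--
--     # creating prefix sum and sufix sum
--     pf_sum[0] = A[0]
--     sf_sum[N-1] = A[N-1]
--
--     for i in range(1, N):
--         pf_sum[i] = pf_sum[i-1] + A[i]
--
--     for i in range(N-2, -1, -1):
--         sf_sum[i] = sf_sum[i+1] + A[i]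
--
--     # finding the max
--     '''
--     considering corner scenarios of
--     sum of B elements from left = pf_sum[B-1]
--     and sum of B elements from right = sf_sum[N-B]
--     '''
--     ans = max(pf_sum[B-1], sf_sum[N-B])
--
--     for i in range(1, B):
--         sum = pf_sum[i-1] + sf_sum[N-B+i]
--         ans = max(ans, sum)
--     return ans
-- ===== SOURCE B (Python) =====
-- def solve(A, B):
--     N = len(A)
--     window = 0
--     for x in A[:B]:
--         window += x
--     ans = window
--     for i in range(1, B + 1):
--         window += A[N - i] - A[B - i]
--         if window > ans:
--             ans = window
--     return ans
-- ===== Notes on version B (the rewrite author's own statement) =====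
-- stated objective: faster
-- what changed: Replaces the two full-length prefix/suffix sum arrays and the scan over them by a single O(B) sliding window that walks the split point across the 2B boundary elements only.
import Mathlib
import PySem

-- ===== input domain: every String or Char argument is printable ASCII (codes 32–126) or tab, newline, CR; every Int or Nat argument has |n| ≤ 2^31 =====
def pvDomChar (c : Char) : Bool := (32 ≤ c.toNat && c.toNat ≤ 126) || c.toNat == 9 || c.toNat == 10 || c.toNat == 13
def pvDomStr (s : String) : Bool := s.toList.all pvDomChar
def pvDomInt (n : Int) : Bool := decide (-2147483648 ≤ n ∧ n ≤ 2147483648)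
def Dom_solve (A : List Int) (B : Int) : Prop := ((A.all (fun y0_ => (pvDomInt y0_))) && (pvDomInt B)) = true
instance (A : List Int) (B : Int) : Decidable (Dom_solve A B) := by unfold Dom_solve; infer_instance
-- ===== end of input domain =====

-- B replaces A's two O(N) prefix/suffix-sum arrays with one O(B) sliding window over the 2B boundary elements.


-- ===== PORT A =====
def solve (A : List Int) (B : Int) : Int :=
  let N : Int := (A.length : Int)
  let pf_sum : List Int := (PySem.List.pyRange 0 N 1).map (fun _ => 0)
  let sf_sum : List Int := (PySem.List.pyRange 0 N 1).map (fun _ => 0)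
  let pf_sum := PySem.List.pySetD pf_sum 0 (PySem.List.pyGetD A 0 0)
  let sf_sum := PySem.List.pySetD sf_sum (N - 1) (PySem.List.pyGetD A (N - 1) 0)
  let pf_sum := (PySem.List.pyRange 1 N 1).foldl
    (fun pf i => PySem.List.pySetD pf i (PySem.List.pyGetD pf (i - 1) 0 + PySem.List.pyGetD A i 0)) pf_sum
  let sf_sum := (PySem.List.pyRange (N - 2) (-1) (-1)).foldl
    (fun sf i => PySem.List.pySetD sf i (PySem.List.pyGetD sf (i + 1) 0 + PySem.List.pyGetD A i 0)) sf_sum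
  let ans := max (PySem.List.pyGetD pf_sum (B - 1) 0) (PySem.List.pyGetD sf_sum (N - B) 0)
  (PySem.List.pyRange 1 B 1).foldl
    (fun ans i => max ans (PySem.List.pyGetD pf_sum (i - 1) 0 + PySem.List.pyGetD sf_sum (N - B + i) 0)) ans

-- ===== PORT B =====
def solve_alt (A : List Int) (B : Int) : Int :=
  let N : Int := (A.length : Int)
  let window := (PySem.List.slice A none (some B)).foldl (fun w x => w + x) 0
  let ans := window
  let st := (PySem.List.pyRange 1 (B + 1) 1).foldl
    (fun (st : Int × Int) i =>
      let w := st.1 + (PySem.List.pyGetD A (N - i) 0 - PySem.List.pyGetD A (B - i) 0)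
      (w, if w > st.2 then w else st.2)) (window, ans)
  st.2

-- ===== PRECONDITION & SPEC =====
-- Pre_solve is exactly where the Python A returns: outside 1 <= B <= len(A) it raises IndexError.
def Pre_solve (A : List Int) (B : Int) : Prop := 1 <= B ∧ B <= (A.length : Int)
instance (A : List Int) (B : Int) : Decidable (Pre_solve A B) := by unfold Pre_solve; infer_instance
def pvWitness_solve : List Int × Int := ([3, -1, 4, 1, 5], 2)

def Spec_solve (A : List Int) (B : Int) (out : Int) : Prop := out = solve_alt A B
instance (A : List Int) (B : Int) (out : Int) : Decidable (Spec_solve A B out) := by unfold Spec_solve; infer_instance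

-- ===== CLAIM (what is proved, stated in full; the proofs are below) =====
def Claim_equal_solve : Prop := ∀ (A : List Int) (B : Int), Dom_solve A B → Pre_solve A B → Spec_solve A B (solve A B)

-- ===== LEMMAS AND PROOFS =====

-- boundary-window sum: pvG A b k = (first k elements) + (last b-k elements), for k <= b <= len A
def pvG (A : List Int) (b k : Nat) : Int :=
  (A.take k).sum + (A.drop (A.length - b + k)).sum

theorem pv_if_max (a w : Int) : (if w > a then w else a) = max a w := by
  by_cases h : w > a <;> simp [h, max_def] <;> omega

-- the prefix-sum loop of A fills pf_sum with the prefix sums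
theorem pv_pf_fold (A : List Int) (k : Nat) (h1 : 1 ≤ k) (hk : k ≤ A.length) :
    (PySem.List.pyRange 1 (k : Int) 1).foldl
      (fun pf i => PySem.List.pySetD pf i (PySem.List.pyGetD pf (i - 1) 0 + PySem.List.pyGetD A i 0))
      ((List.range 1).map (fun j => (A.take (j + 1)).sum) ++ List.replicate (A.length - 1) 0)
    = (List.range k).map (fun j => (A.take (j + 1)).sum) ++ List.replicate (A.length - k) 0 := by
  induction k, h1 using Nat.le_induction with
  | base =>
    rw [PySem.List.pyRange_one_eq_nil (by norm_num)]
    rfl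
  | succ k hk1 ih =>
    have hkd : k < A.length := by omega
    have hcast : ((k + 1 : Nat) : Int) = (k : Int) + 1 := by push_cast; ring
    rw [hcast, PySem.List.pyRange_one_succ_right (by exact_mod_cast hk1), List.foldl_append,
      ih (by omega)]
    simp only [List.foldl_cons, List.foldl_nil]
    have h1c : ((k : Int) - 1) = ((k - 1 : Nat) : Int) := by omega
    rw [h1c, PySem.List.pyGetD_natCast, PySem.List.pyGetD_natCast, PySem.List.pySetD_natCast]
    have hread : ((List.range k).map (fun j => (A.take (j + 1)).sum)
        ++ List.replicate (A.length - k) 0).getD (k - 1) 0 = (A.take k).sum := by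
      have hlen : k - 1 < ((List.range k).map (fun j => (A.take (j + 1)).sum)).length := by
        simp only [List.length_map, List.length_range]; omega
      rw [List.getD_append _ _ _ _ hlen]
      rw [PySem.List.getD_map_range _ _ _ _ (by omega)]
      have hk' : k - 1 + 1 = k := by omega
      simp [hk']
    have hA : A.getD k 0 = A[k] := by
      simp [List.getD_eq_getElem?_getD, List.getElem?_eq_getElem hkd]
    rw [hread, hA, ← List.sum_take_succ A k hkd]
    have hrepl : List.replicate (A.length - k) (0 : Int)
        = 0 :: List.replicate (A.length - (k + 1)) 0 := by
      rw [← List.replicate_succ]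
      congr 1
      omega
    rw [hrepl, List.range_succ, List.map_append, List.append_assoc]
    rw [List.set_append_right _ _ (by simp)]
    simp

-- the suffix-sum loop of A fills sf_sum with the suffix sums
theorem pv_sf_fold (A : List Int) (k : Nat) (hk : k + 1 ≤ A.length) :
    (PySem.List.pyRange ((k : Int) - 1) (-1) (-1)).foldl
      (fun sf i => PySem.List.pySetD sf i (PySem.List.pyGetD sf (i + 1) 0 + PySem.List.pyGetD A i 0))
      (List.replicate k 0 ++ (List.range (A.length - k)).map (fun j => (A.drop (k + j)).sum))
    = (List.range A.length).map (fun j => (A.drop j).sum) := by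
  induction k with
  | zero =>
    rw [show ((0 : Nat) : Int) - 1 = -1 by norm_num, PySem.List.pyRange_neg_one_eq_nil (by norm_num)]
    simp
  | succ k ih =>
    have hkd : k < A.length := by omega
    have hc1 : ((k + 1 : Nat) : Int) - 1 = ((k : Nat) : Int) := by push_cast; ring
    rw [hc1, PySem.List.pyRange_neg_one_cons (by omega), List.foldl_cons]
    have hstep : PySem.List.pySetD
          (List.replicate (k + 1) 0 ++ (List.range (A.length - (k + 1))).map (fun j => (A.drop (k + 1 + j)).sum))
          ((k : Nat) : Int)
          (PySem.List.pyGetD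
            (List.replicate (k + 1) 0 ++ (List.range (A.length - (k + 1))).map (fun j => (A.drop (k + 1 + j)).sum))
            (((k : Nat) : Int) + 1) 0
           + PySem.List.pyGetD A ((k : Nat) : Int) 0)
        = List.replicate k 0 ++ (List.range (A.length - k)).map (fun j => (A.drop (k + j)).sum) := by
      have hc2 : ((k : Nat) : Int) + 1 = ((k + 1 : Nat) : Int) := by push_cast; ring
      rw [hc2, PySem.List.pyGetD_natCast, PySem.List.pyGetD_natCast, PySem.List.pySetD_natCast]
      have hread : (List.replicate (k + 1) (0 : Int)
          ++ (List.range (A.length - (k + 1))).map (fun j => (A.drop (k + 1 + j)).sum)).getD (k + 1) 0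
          = (A.drop (k + 1)).sum := by
        rw [List.getD_append_right _ _ _ _ (by simp)]
        simp only [List.length_replicate, Nat.sub_self]
        rw [PySem.List.getD_map_range _ _ _ _ (by omega)]
      have hA : A.getD k 0 = A[k] := by
        simp [List.getD_eq_getElem?_getD, List.getElem?_eq_getElem hkd]
      rw [hread, hA]
      have hv : (A.drop (k + 1)).sum + A[k] = (A.drop k).sum := by
        rw [List.drop_eq_getElem_cons hkd, List.sum_cons]
        ring
      rw [hv]
      rw [List.replicate_succ', List.append_assoc]
      rw [List.set_append_right _ _ (by simp)]
      congr 1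
      have hnk : A.length - k = (A.length - (k + 1)) + 1 := by omega
      rw [hnk, List.range_succ_eq_map, List.map_cons, List.map_map]
      simp only [List.length_replicate, Nat.sub_self, List.singleton_append, List.set_cons_zero]
      congr 1
      apply List.map_congr_left
      intro j hj
      simp only [Function.comp_apply, Nat.succ_eq_add_one]
      congr 2
      omega
    rw [hstep]
    exact ih (by omega)

-- B's sliding-window loop: the window walks G down from G b, the accumulator is the running max
theorem pv_win_fold (G : Nat → Int) (d : Nat → Int) (b : Nat)
    (h : ∀ k < b, G (b - (k + 1)) = G (b - k) + d k) (j : Nat) (hj : j ≤ b) :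
    (List.range j).foldl
      (fun (st : Int × Int) k =>
        (st.1 + d k, if st.1 + d k > st.2 then st.1 + d k else st.2)) (G b, G b)
    = (G (b - j), List.foldl max (G b) ((List.range j).map (fun k => G (b - (k + 1))))) := by
  induction j with
  | zero => simp
  | succ j ih =>
    rw [List.range_succ, List.foldl_append, ih (by omega), List.map_append, List.foldl_append]
    simp only [List.foldl_cons, List.foldl_nil, List.map_cons, List.map_nil]
    rw [← h j (by omega), pv_if_max]

theorem pv_map_rev (G : Nat → Int) (b : Nat) :
    (List.range b).map (fun k => G (b - (k + 1))) = ((List.range b).map G).reverse := by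
  apply List.ext_getElem
  · simp
  · intro i h1 h2
    simp only [List.getElem_map, List.getElem_range, List.getElem_reverse, List.length_map,
      List.length_range] at *
    congr 1
    omega



theorem pv_zeros (n : Nat) :
    (PySem.List.pyRange 0 (n : Int) 1).map (fun _ => (0 : Int)) = List.replicate n 0 := by
  rw [List.map_const']
  simp

theorem pv_getD_elem (A : List Int) (k : Nat) (h : k < A.length) : A.getD k 0 = A[k] := by
  simp [List.getD_eq_getElem?_getD, List.getElem?_eq_getElem h]

theorem pv_pf_init (A : List Int) (h : 1 ≤ A.length) :
    PySem.List.pySetD (List.replicate A.length (0 : Int)) 0 (PySem.List.pyGetD A 0 0)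
    = (List.range 1).map (fun j => (A.take (j + 1)).sum) ++ List.replicate (A.length - 1) 0 := by
  obtain ⟨m, hm⟩ : ∃ m, A.length = m + 1 := ⟨A.length - 1, by omega⟩
  rw [PySem.List.pyGetD_zero, PySem.List.pySetD_of_nonneg _ _ (by norm_num), hm]
  rw [List.replicate_succ, Int.toNat_zero, List.set_cons_zero]
  have h0 : A.getD 0 0 = A[0]'(by omega) := pv_getD_elem A 0 (by omega)
  have h1 : (A.take (0 + 1)).sum = A[0]'(by omega) := by
    rw [List.sum_take_succ A 0 (by omega)]
    simp
  simp [h1, List.getD_eq_getElem?_getD, List.getElem?_eq_getElem (show 0 < A.length from by omega)]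

theorem pv_sf_init (A : List Int) (h : 1 ≤ A.length) :
    PySem.List.pySetD (List.replicate A.length (0 : Int)) ((A.length : Int) - 1)
      (PySem.List.pyGetD A ((A.length : Int) - 1) 0)
    = List.replicate (A.length - 1) 0
      ++ (List.range (A.length - (A.length - 1))).map (fun j => (A.drop (A.length - 1 + j)).sum) := by
  rw [show (A.length : Int) - 1 = ((A.length - 1 : Nat) : Int) from by omega]
  rw [PySem.List.pyGetD_natCast, PySem.List.pySetD_natCast]
  rw [show A.length - (A.length - 1) = 1 from by omega]
  have hd : A.getD (A.length - 1) 0 = (A.drop (A.length - 1)).sum := by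
    rw [List.drop_eq_getElem_cons (show A.length - 1 < A.length from by omega)]
    rw [show A.length - 1 + 1 = A.length from by omega]
    simp [List.getD_eq_getElem?_getD,
      List.getElem?_eq_getElem (show A.length - 1 < A.length from by omega)]
  rw [hd]
  conv_lhs => rw [show A.length = (A.length - 1) + 1 from by omega, List.replicate_succ']
  rw [List.set_append_right _ _ (by simp)]
  simp

theorem pv_fold_shift (G : Nat → Int) (m : Nat) :
    List.foldl (fun ans k => max ans (G (k + 1))) (max (G (m + 1)) (G 0)) (List.range m)
    = List.foldl max (G (m + 1)) ((List.range (m + 1)).map G) := by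
  rw [List.range_succ_eq_map, List.map_cons, List.foldl_cons, List.map_map, List.foldl_map]
  rfl

-- pvG characterization of port A
theorem pv_solve_eq (A : List Int) (b : Nat) (hb1 : 1 ≤ b) (hbn : b ≤ A.length) :
    solve A ((b : Nat) : Int) = List.foldl max (pvG A b b) ((List.range b).map (pvG A b)) := by
  have hn1 : 1 ≤ A.length := le_trans hb1 hbn
  obtain ⟨m, rfl⟩ : ∃ m, b = m + 1 := ⟨b - 1, by omega⟩
  simp only [solve]
  rw [pv_zeros, pv_pf_init A hn1, pv_pf_fold A A.length hn1 le_rfl]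
  rw [pv_sf_init A hn1]
  rw [show (A.length : Int) - 2 = ((A.length - 1 : Nat) : Int) - 1 from by omega]
  rw [pv_sf_fold A (A.length - 1) (by omega)]
  simp only [Nat.sub_self, List.replicate_zero, List.append_nil]
  rw [show ((m + 1 : Nat) : Int) - 1 = ((m : Nat) : Int) from by omega]
  rw [show (A.length : Int) - ((m + 1 : Nat) : Int) = ((A.length - (m + 1) : Nat) : Int) from by
    omega]
  simp only [PySem.List.pyGetD_natCast]
  rw [PySem.List.getD_map_range _ _ _ _ (show m < A.length from by omega)]
  rw [PySem.List.getD_map_range _ _ _ _ (show A.length - (m + 1) < A.length from by omega)]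
  rw [PySem.List.pyRange_one 1 ((m + 1 : Nat) : Int)]
  rw [show (((m + 1 : Nat) : Int) - 1).toNat = m from by omega]
  rw [List.foldl_map]
  rw [PySem.List.foldl_congr_mem (List.range m) _
    (fun ans k => max ans (pvG A (m + 1) (k + 1))) _
    (by
      intro acc k hk
      simp only [List.mem_range] at hk
      rw [show (1 : Int) + (k : Nat) - 1 = ((k : Nat) : Int) from by omega]
      rw [show ((A.length - (m + 1) : Nat) : Int) + (1 + (k : Nat))
          = ((A.length - (m + 1) + (k + 1) : Nat) : Int) from by omega]
      rw [PySem.List.pyGetD_natCast, PySem.List.pyGetD_natCast]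
      rw [PySem.List.getD_map_range _ _ _ _ (show k < A.length from by omega)]
      rw [PySem.List.getD_map_range _ _ _ _
        (show A.length - (m + 1) + (k + 1) < A.length from by omega)]
      rfl)]
  have hGb : pvG A (m + 1) (m + 1) = (A.take (m + 1)).sum := by
    unfold pvG
    rw [show A.length - (m + 1) + (m + 1) = A.length from by omega]
    simp
  have hG0 : pvG A (m + 1) 0 = (A.drop (A.length - (m + 1))).sum := by
    unfold pvG
    simp
  rw [← hGb, ← hG0]
  exact pv_fold_shift (pvG A (m + 1)) m

theorem pv_foldl_sum (l : List Int) : l.foldl (fun w x => w + x) 0 = l.sum := by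
  simpa using PySem.List.foldl_add l (fun x => x) 0

-- d k = A[n-(k+1)] - A[b-(k+1)]: what one step of B's window loop adds
def pvD (A : List Int) (b k : Nat) : Int :=
  A.getD (A.length - (k + 1)) 0 - A.getD (b - (k + 1)) 0

-- pvG characterization of port B
theorem pv_solve_alt_eq (A : List Int) (b : Nat) (hb1 : 1 ≤ b) (hbn : b ≤ A.length) :
    solve_alt A ((b : Nat) : Int)
    = List.foldl max (pvG A b b) (((List.range b).map (pvG A b)).reverse) := by
  have hGb : pvG A b b = (A.take b).sum := by
    unfold pvG
    rw [show A.length - b + b = A.length from by omega]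
    simp
  simp only [solve_alt]
  rw [PySem.List.slice_to_natCast, pv_foldl_sum, ← hGb]
  rw [PySem.List.pyRange_one 1 ((b : Nat) + 1 : Int)]
  rw [show (((b : Nat) : Int) + 1 - 1).toNat = b from by omega]
  rw [List.foldl_map]
  rw [PySem.List.foldl_congr_mem (List.range b) _
    (fun (st : Int × Int) k =>
      (st.1 + pvD A b k, if st.1 + pvD A b k > st.2 then st.1 + pvD A b k else st.2)) _
    (by
      intro st k hk
      simp only [List.mem_range] at hk
      rw [show (A.length : Int) - (1 + (k : Nat)) = ((A.length - (k + 1) : Nat) : Int) from by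
        omega]
      rw [show ((b : Nat) : Int) - (1 + (k : Nat)) = ((b - (k + 1) : Nat) : Int) from by omega]
      rw [PySem.List.pyGetD_natCast, PySem.List.pyGetD_natCast]
      rfl)]
  have hstep : ∀ k < b, pvG A b (b - (k + 1)) = pvG A b (b - k) + pvD A b k := by
    intro k hk
    unfold pvG pvD
    have h1 : b - k = (b - (k + 1)) + 1 := by omega
    rw [h1, List.sum_take_succ A (b - (k + 1)) (by omega)]
    have h2 : A.length - b + (b - (k + 1)) = A.length - (k + 1) := by omega
    have h3 : A.length - b + ((b - (k + 1)) + 1) = A.length - k := by omega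
    rw [h2, h3]
    rw [List.drop_eq_getElem_cons (show A.length - (k + 1) < A.length from by omega),
      List.sum_cons]
    rw [pv_getD_elem A (A.length - (k + 1)) (by omega), pv_getD_elem A (b - (k + 1)) (by omega)]
    rw [show A.length - (k + 1) + 1 = A.length - k from by omega]
    ring
  rw [pv_win_fold (pvG A b) (pvD A b) b hstep b le_rfl]
  rw [pv_map_rev]

-- ===== VERDICT (by name: the statement is the Claim_ definition above) =====
theorem solve_spec : Claim_equal_solve := by
  intro A B _ hpre
  unfold Spec_solve
  obtain ⟨hB1, hBn⟩ := hpre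
  have hBb : B = ((B.toNat : Nat) : Int) := by omega
  have hb1 : 1 ≤ B.toNat := by omega
  have hbn : B.toNat ≤ A.length := by omega
  rw [hBb, pv_solve_eq A B.toNat hb1 hbn, pv_solve_alt_eq A B.toNat hb1 hbn]
  exact ((List.reverse_perm _).foldl_eq _).symm
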